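-- pv_equiv track=rewrite | github.com/Chanakyasinde/Practice_Problems | Python/Python_Maths/check_orthogonal_matrix.py | is_orthogonal
-- ===== SOURCE A (Python) =====
-- def is_orthogonal(n, matrix):
--     transpose = [[matrix[j][i] for j in range(n)] for i in range(n)]
--     result = [[sum(matrix[i][k] * transpose[k][j] for k in range(n)) for j in range(n)] for i in range(n)]
--     for i in range(n):
--         for j in range(n):
--             if i == j and result[i][j] != 1:
--                 return False
--             elif i != j and result[i][j] != 0:
--                 return False
--
--     return True
-- ===== SOURCE B (Python) =====
-- def _dot(ri, rj, n):
--     return sum(ri[k] * rj[k] for k in range(n))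
--
-- def is_orthogonal(n, matrix):
--     # fused early-exit check of M*M^T = I over the upper triangle only:
--     # M*M^T is symmetric, so checking j >= i suffices; no transpose or
--     # product matrix is materialised.
--     for i in range(n):
--         row_i = matrix[i]
--         for j in range(i, n):
--             if _dot(row_i, matrix[j], n) != (1 if i == j else 0):
--                 return False
--     return True
-- ===== Notes on version B (the rewrite author's own statement) =====
-- stated objective: faster
-- what changed: B drops the materialised transpose and product matrices and checks dot products directly over only the upper triangle (j >= i), returning False at the first failing entry, relying on the symmetry of M*M^T.
import Mathlib
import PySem

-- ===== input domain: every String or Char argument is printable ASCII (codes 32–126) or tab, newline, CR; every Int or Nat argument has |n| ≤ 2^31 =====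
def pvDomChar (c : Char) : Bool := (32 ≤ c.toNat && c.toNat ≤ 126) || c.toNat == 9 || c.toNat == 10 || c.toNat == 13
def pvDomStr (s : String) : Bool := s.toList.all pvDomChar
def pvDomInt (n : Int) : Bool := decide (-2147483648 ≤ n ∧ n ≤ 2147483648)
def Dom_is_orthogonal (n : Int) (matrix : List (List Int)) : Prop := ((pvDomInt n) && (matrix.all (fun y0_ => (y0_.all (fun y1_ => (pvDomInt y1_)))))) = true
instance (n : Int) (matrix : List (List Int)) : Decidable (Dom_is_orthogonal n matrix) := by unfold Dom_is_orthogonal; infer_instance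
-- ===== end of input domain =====

-- B changes what A builds: no transpose/product matrices, one fused upper-triangle
-- early-exit pass over dot products (objective: faster by a constant factor).

-- ===== PORT A =====
-- matrix[i][j] (defaults only reached outside Pre_)
def pvEntry (m : List (List Int)) (i j : Int) : Int :=
  PySem.List.pyGetD (PySem.List.pyGetD m i []) j 0

def is_orthogonal (n : Int) (matrix : List (List Int)) : Bool :=
  let rng := PySem.List.pyRange 0 n 1
  let transpose := rng.map (fun i => rng.map (fun j => pvEntry matrix j i))
  let result := rng.map (fun i => rng.map (fun j =>
    rng.foldl (fun s k => s + pvEntry matrix i k * pvEntry transpose k j) 0))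
  rng.all (fun i => rng.all (fun j =>
    !(((i == j) && (pvEntry result i j != 1)) || ((i != j) && (pvEntry result i j != 0)))))

-- ===== PORT B =====
def pvDot (ri rj : List Int) (n : Int) : Int :=
  (PySem.List.pyRange 0 n 1).foldl
    (fun s k => s + PySem.List.pyGetD ri k 0 * PySem.List.pyGetD rj k 0) 0

def is_orthogonal_alt (n : Int) (matrix : List (List Int)) : Bool :=
  (PySem.List.pyRange 0 n 1).all (fun i =>
    let rowi := PySem.List.pyGetD matrix i []
    (PySem.List.pyRange i n 1).all (fun j =>
      pvDot rowi (PySem.List.pyGetD matrix j []) n == (if i == j then (1 : Int) else 0)))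

-- ===== PRECONDITION & SPEC =====
-- Pre_: A indexes matrix[j][i] for all i,j < n, so it raises IndexError unless the
-- first n rows exist and each has length ≥ n; exactly those inputs are excluded.
def Pre_is_orthogonal (n : Int) (matrix : List (List Int)) : Prop :=
  n ≤ (matrix.length : Int) ∧ ∀ r ∈ matrix.take n.toNat, n ≤ (r.length : Int)
instance (n : Int) (matrix : List (List Int)) : Decidable (Pre_is_orthogonal n matrix) := by
  unfold Pre_is_orthogonal; infer_instance

def pvWitness_is_orthogonal : Int × List (List Int) := (2, [[0, 1], [1, 0]])

def Spec_is_orthogonal (n : Int) (matrix : List (List Int)) (out : Bool) : Prop := out = is_orthogonal_alt n matrix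
instance (n : Int) (matrix : List (List Int)) (out : Bool) : Decidable (Spec_is_orthogonal n matrix out) := by unfold Spec_is_orthogonal; infer_instance

-- ===== CLAIM (what is proved, stated in full; the proofs are below) =====
def Claim_equal_is_orthogonal : Prop := ∀ (n : Int) (matrix : List (List Int)), Dom_is_orthogonal n matrix → Pre_is_orthogonal n matrix → Spec_is_orthogonal n matrix (is_orthogonal n matrix)

-- ===== LEMMAS AND PROOFS =====

-- indexing a map-over-range comprehension picks out the generator value
theorem pvEntry_map_map (f : Int → Int → Int) (n i j : Int)
    (hi0 : 0 ≤ i) (hin : i < n) (hj0 : 0 ≤ j) (hjn : j < n) :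
    pvEntry ((PySem.List.pyRange 0 n 1).map
        (fun i => (PySem.List.pyRange 0 n 1).map (fun j => f i j))) i j
      = f i j := by
  unfold pvEntry
  rw [PySem.List.pyGetD_map_pyRange_of_nonneg _ _ _ _ hi0 hin,
      PySem.List.pyGetD_map_pyRange_of_nonneg _ _ _ _ hj0 hjn]

-- A's product entry, with the transpose access resolved, is B's dot product
theorem resultEntry_eq_pvDot (n i j : Int) (matrix : List (List Int))
    (hj0 : 0 ≤ j) (hjn : j < n) :
    (PySem.List.pyRange 0 n 1).foldl
      (fun s k => s + pvEntry matrix i k *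
        pvEntry ((PySem.List.pyRange 0 n 1).map
          (fun i => (PySem.List.pyRange 0 n 1).map (fun j => pvEntry matrix j i))) k j) 0
      = pvDot (PySem.List.pyGetD matrix i []) (PySem.List.pyGetD matrix j []) n := by
  unfold pvDot
  apply PySem.List.foldl_congr_mem
  intro acc k hk
  rcases (PySem.List.mem_pyRange_one).1 hk with ⟨hk0, hkn⟩
  rw [pvEntry_map_map (fun a b => pvEntry matrix b a) n k j hk0 hkn hj0 hjn]
  rfl

-- symmetry of the dot product
theorem pvDot_comm (ri rj : List Int) (n : Int) : pvDot ri rj n = pvDot rj ri n := by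
  unfold pvDot
  apply PySem.List.foldl_congr_mem
  intro acc k _
  ring

-- A's branch pair collapses to B's single comparison
theorem pred_eq (i j d : Int) :
    (!(((i == j) && (d != 1)) || ((i != j) && (d != 0))))
      = (d == (if i == j then (1 : Int) else 0)) := by
  by_cases h : i = j
  · simp [h, bne]
  · have hb : (i == j) = false := beq_eq_false_iff_ne.2 h
    simp [hb, bne]

-- B's comparison is symmetric in i and j
theorem predB_symm (n i j : Int) (matrix : List (List Int)) :
    (pvDot (PySem.List.pyGetD matrix i []) (PySem.List.pyGetD matrix j []) n
        == (if i == j then (1 : Int) else 0))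
      = (pvDot (PySem.List.pyGetD matrix j []) (PySem.List.pyGetD matrix i []) n
        == (if j == i then (1 : Int) else 0)) := by
  rw [pvDot_comm]
  by_cases h : i = j
  · simp [h]
  · simp [h, Ne.symm h]

-- ===== VERDICT (by name: the statement is the Claim_ definition above) =====
theorem is_orthogonal_spec : Claim_equal_is_orthogonal := by
  intro n matrix _ _
  unfold Spec_is_orthogonal
  simp only [is_orthogonal, is_orthogonal_alt]
  have hA : ∀ i j : Int, 0 ≤ i → i < n → 0 ≤ j → j < n →
      (!(((i == j) && (pvEntry ((PySem.List.pyRange 0 n 1).map (fun i => (PySem.List.pyRange 0 n 1).map (fun j =>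
          (PySem.List.pyRange 0 n 1).foldl (fun s k => s + pvEntry matrix i k *
            pvEntry ((PySem.List.pyRange 0 n 1).map (fun i => (PySem.List.pyRange 0 n 1).map (fun j => pvEntry matrix j i))) k j) 0))) i j != 1)) ||
        ((i != j) && (pvEntry ((PySem.List.pyRange 0 n 1).map (fun i => (PySem.List.pyRange 0 n 1).map (fun j =>
          (PySem.List.pyRange 0 n 1).foldl (fun s k => s + pvEntry matrix i k *
            pvEntry ((PySem.List.pyRange 0 n 1).map (fun i => (PySem.List.pyRange 0 n 1).map (fun j => pvEntry matrix j i))) k j) 0))) i j != 0))))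
      = (pvDot (PySem.List.pyGetD matrix i []) (PySem.List.pyGetD matrix j []) n
          == (if i == j then (1 : Int) else 0)) := by
    intro i j hi0 hin hj0 hjn
    rw [pvEntry_map_map (fun i j =>
      (PySem.List.pyRange 0 n 1).foldl (fun s k => s + pvEntry matrix i k *
        pvEntry ((PySem.List.pyRange 0 n 1).map (fun i => (PySem.List.pyRange 0 n 1).map (fun j => pvEntry matrix j i))) k j) 0)
      n i j hi0 hin hj0 hjn]
    rw [resultEntry_eq_pvDot n i j matrix hj0 hjn]
    exact pred_eq i j _
  rw [Bool.eq_iff_iff]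
  simp only [List.all_eq_true, PySem.List.mem_pyRange_one]
  constructor
  · intro h i hi j hj
    have hj' : 0 ≤ j ∧ j < n := ⟨le_trans hi.1 hj.1, hj.2⟩
    have := h i hi j hj'
    rwa [hA i j hi.1 hi.2 hj'.1 hj'.2] at this
  · intro h i hi j hj
    rw [hA i j hi.1 hi.2 hj.1 hj.2]
    rcases le_total i j with hle | hle
    · exact h i hi j ⟨hle, hj.2⟩
    · rw [predB_symm]
      exact h j hj i ⟨hle, hi.2⟩
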